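-- pv_equiv track=rewrite | github.com/Sinity/polylogue | polylogue/lib/threads.py | _bfs_depth
-- ===== SOURCE A (Python) =====
-- def _bfs_depth(adjacency: dict[str, list[str]], root: str) -> int:
--     visited = {root}
--     frontier = [root]
--     depth = 0
--     while frontier:
--         next_frontier: list[str] = []
--         for node in frontier:
--             for child in adjacency.get(node, []):
--                 if child not in visited:
--                     visited.add(child)
--                     next_frontier.append(child)
--         if not next_frontier:
--             break
--         depth += 1
--         frontier = next_frontier
--     return depth
-- ===== SOURCE B (Python) =====
-- def _bfs_depth(adjacency: dict[str, list[str]], root: str) -> int: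
--     visited = {root}
--     queue = [(root, 0)]
--     i = 0
--     max_depth = 0
--     while i < len(queue):
--         node, dist = queue[i]
--         i += 1
--         max_depth = max(max_depth, dist)
--         for child in adjacency.get(node, []):
--             if child not in visited:
--                 visited.add(child)
--                 queue.append((child, dist + 1))
--     return max_depth
-- ===== Notes on version B (the rewrite author's own statement) =====
-- stated objective: alternative
-- what changed: Replaces the layered frontier/next_frontier double loop with a single FIFO queue of (node, distance) pairs scanned once with an index pointer, tracking the maximum distance instead of counting layers.
import Mathlib
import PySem

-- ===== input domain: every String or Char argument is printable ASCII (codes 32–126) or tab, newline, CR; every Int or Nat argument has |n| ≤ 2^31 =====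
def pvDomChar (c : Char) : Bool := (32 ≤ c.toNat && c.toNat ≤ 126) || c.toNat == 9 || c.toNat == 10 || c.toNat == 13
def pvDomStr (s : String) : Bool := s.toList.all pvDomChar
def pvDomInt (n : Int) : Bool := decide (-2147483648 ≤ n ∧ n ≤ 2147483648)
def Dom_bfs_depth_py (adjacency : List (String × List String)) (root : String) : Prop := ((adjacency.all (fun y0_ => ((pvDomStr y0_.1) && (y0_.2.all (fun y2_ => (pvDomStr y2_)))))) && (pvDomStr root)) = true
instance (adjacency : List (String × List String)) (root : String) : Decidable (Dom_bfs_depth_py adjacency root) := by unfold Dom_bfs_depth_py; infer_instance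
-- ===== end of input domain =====

-- B replaces A's layered frontier/next_frontier loop by a single FIFO queue of
-- (node, distance) pairs and returns the maximum distance ever dequeued (objective:
-- alternative decomposition, same asymptotic cost). Equivalence of the RETURN values
-- is proved for all inputs (both programs are total).

-- ===== PORT A =====
-- the inner 'for child …: if child not in visited: visited.add(child); next_frontier.append(child)' body
def pvStepA (st : PySem.Set String × List String) (child : String) : PySem.Set String × List String :=
  if child ∈ st.1 then st else (PySem.Set.add st.1 child, st.2 ++ [child])

-- one iteration of 'for node in frontier' (the 'for child in adjacency.get(node, [])' loop)
def pvExpandNode (adjacency : List (String × List String))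
    (st : PySem.Set String × List String) (node : String) : PySem.Set String × List String :=
  ((PySem.Dict.mk adjacency).getD node []).foldl pvStepA st

-- the whole body of one 'while frontier' iteration: (visited, next_frontier) after the double loop
def pvExpandA (adjacency : List (String × List String))
    (st : PySem.Set String × List String) (frontier : List String) : PySem.Set String × List String :=
  frontier.foldl (pvExpandNode adjacency) st

-- ---- facts cited by the termination proofs of the two loops ----
def pvUniv (adjacency : List (String × List String)) : Finset String :=
  (adjacency.flatMap (·.2)).toFinset

theorem pvChild_mem_univ (adjacency : List (String × List String)) (node c : String)
    (h : c ∈ (PySem.Dict.mk adjacency).getD node []) : c ∈ adjacency.flatMap (·.2) := by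
  simp [PySem.Dict.getD, PySem.Dict.get?] at h
  rcases h2 : List.find? (fun p => p.1 == node) adjacency with _ | ⟨k, v⟩
  · simp [h2] at h
  · simp only [h2, Option.map_some, Option.getD_some] at h
    exact List.mem_flatMap.2 ⟨(k, v), List.mem_of_find?_eq_some h2, h⟩

theorem pvStepA_fst_mono (cs : List String) (st : PySem.Set String × List String)
    {x : String} (hx : x ∈ st.1) : x ∈ (cs.foldl pvStepA st).1 := by
  induction cs generalizing st with
  | nil => exact hx
  | cons c cs ih =>
      simp only [List.foldl_cons]
      unfold pvStepA
      split
      · exact ih st hx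
      · exact ih _ ((PySem.Set.mem_add st.1 c x).2 (Or.inl hx))

theorem pvFoldA_growth (cs : List String) (st : PySem.Set String × List String) :
    cs.foldl pvStepA st = st ∨ ∃ x ∈ cs, x ∉ st.1 ∧ x ∈ (cs.foldl pvStepA st).1 := by
  induction cs generalizing st with
  | nil => exact Or.inl rfl
  | cons c cs ih =>
      simp only [List.foldl_cons]
      by_cases hc : c ∈ st.1
      · rw [show pvStepA st c = st by simp [pvStepA, hc]]
        rcases ih st with h | ⟨x, hx1, hx2, hx3⟩
        · exact Or.inl h
        · exact Or.inr ⟨x, List.mem_cons_of_mem _ hx1, hx2, hx3⟩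
      · refine Or.inr ⟨c, List.mem_cons_self, hc, ?_⟩
        rw [show pvStepA st c = (PySem.Set.add st.1 c, st.2 ++ [c]) by simp [pvStepA, hc]]
        exact pvStepA_fst_mono cs _ ((PySem.Set.mem_add st.1 c c).2 (Or.inr rfl))

theorem pvCard_lt (adjacency : List (String × List String)) {V W : List String}
    (hsub : ∀ y ∈ V, y ∈ W) {x : String} (hx : x ∈ adjacency.flatMap (·.2))
    (hxV : x ∉ V) (hxW : x ∈ W) :
    (pvUniv adjacency \ W.toFinset).card < (pvUniv adjacency \ V.toFinset).card := by
  apply Finset.card_lt_card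
  have hss : pvUniv adjacency \ W.toFinset ⊆ pvUniv adjacency \ V.toFinset := by
    intro y hy
    rcases Finset.mem_sdiff.1 hy with ⟨hy1, hy2⟩
    exact Finset.mem_sdiff.2 ⟨hy1, fun hyV => hy2 (List.mem_toFinset.2 (hsub y (List.mem_toFinset.1 hyV)))⟩
  refine (Finset.ssubset_iff_of_subset hss).2 ⟨x, ?_, ?_⟩
  · exact Finset.mem_sdiff.2 ⟨List.mem_toFinset.2 hx, fun hc => hxV (List.mem_toFinset.1 hc)⟩
  · intro hc
    exact (Finset.mem_sdiff.1 hc).2 (List.mem_toFinset.2 hxW)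

theorem pvExpandA_fst_mono (adjacency : List (String × List String)) (f : List String)
    (st : PySem.Set String × List String) {x : String} (hx : x ∈ st.1) :
    x ∈ (pvExpandA adjacency st f).1 := by
  induction f generalizing st with
  | nil => exact hx
  | cons n f ih => exact ih _ (pvStepA_fst_mono _ st hx)

theorem pvExpandA_growth (adjacency : List (String × List String)) (f : List String)
    (st : PySem.Set String × List String) :
    pvExpandA adjacency st f = st ∨
      ∃ x, x ∈ adjacency.flatMap (·.2) ∧ x ∉ st.1 ∧ x ∈ (pvExpandA adjacency st f).1 := by
  induction f generalizing st with
  | nil => exact Or.inl rfl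
  | cons n f ih =>
      rcases pvFoldA_growth ((PySem.Dict.mk adjacency).getD n []) st with h | ⟨x, hx1, hx2, hx3⟩
      · rcases ih (pvExpandNode adjacency st n) with h2 | ⟨x, hx1, hx2, hx3⟩
        · exact Or.inl (by
            show pvExpandA adjacency (pvExpandNode adjacency st n) f = st
            rw [h2]; exact h)
        · refine Or.inr ⟨x, hx1, ?_, hx3⟩
          intro hc; exact hx2 (by rw [show pvExpandNode adjacency st n = st from h]; exact hc)
      · exact Or.inr ⟨x, pvChild_mem_univ adjacency n x hx1, hx2,
          pvExpandA_fst_mono adjacency f _ hx3⟩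

theorem pvLoopA_dec (adjacency : List (String × List String)) (V : PySem.Set String)
    (f : List String) (h : (pvExpandA adjacency (V, []) f).2 ≠ []) :
    (pvUniv adjacency \ (pvExpandA adjacency (V, []) f).1.toFinset).card <
      (pvUniv adjacency \ V.toFinset).card := by
  rcases pvExpandA_growth adjacency f (V, []) with heq | ⟨x, hx1, hx2, hx3⟩
  · exact absurd (by rw [heq]) h
  · exact pvCard_lt adjacency (fun y hy => pvExpandA_fst_mono adjacency f (V, []) hy) hx1 hx2 hx3

-- the 'while frontier' loop of A
def pvLoopA (adjacency : List (String × List String)) (V : PySem.Set String)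
    (frontier : List String) (depth : Int) : Int :=
  if hf : frontier = [] then depth
  else
    let st := pvExpandA adjacency (V, []) frontier
    if h2 : st.2 = [] then depth
    else pvLoopA adjacency st.1 st.2 (depth + 1)
termination_by (pvUniv adjacency \ V.toFinset).card
decreasing_by exact pvLoopA_dec adjacency V frontier h2

def bfs_depth_py (adjacency : List (String × List String)) (root : String) : Int :=
  pvLoopA adjacency (PySem.Set.ofList [root]) [root] 0

-- ===== PORT B =====
-- the body of B's 'for child …: if child not in visited: visited.add(child); queue.append((child, dist + 1))'
def pvStepB (d : Int) (st : PySem.Set String × List (String × Int)) (child : String) :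
    PySem.Set String × List (String × Int) :=
  if child ∈ st.1 then st else (PySem.Set.add st.1 child, st.2 ++ [(child, d + 1)])

-- ---- facts cited by pvLoopB's termination proof ----
theorem pvFoldA_acc (cs : List String) (V : PySem.Set String) (a : List String) :
    cs.foldl pvStepA (V, a) =
      ((cs.foldl pvStepA (V, [])).1, a ++ (cs.foldl pvStepA (V, [])).2) := by
  induction cs generalizing V a with
  | nil => simp
  | cons c cs ih =>
      simp only [List.foldl_cons]
      by_cases hc : c ∈ V
      · simp only [pvStepA, hc, if_pos]; exact ih V a
      · simp only [pvStepA, hc, if_neg, not_false_iff, List.nil_append]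
        rw [ih (PySem.Set.add V c) (a ++ [c]), ih (PySem.Set.add V c) [c], List.append_assoc]

theorem pvFoldB_eq (cs : List String) (V : PySem.Set String) (b : List (String × Int)) (d : Int) :
    cs.foldl (pvStepB d) (V, b) =
      ((cs.foldl pvStepA (V, [])).1,
        b ++ ((cs.foldl pvStepA (V, [])).2).map (fun c => (c, d + 1))) := by
  induction cs generalizing V b with
  | nil => simp
  | cons c cs ih =>
      simp only [List.foldl_cons]
      by_cases hc : c ∈ V
      · simp only [pvStepB, pvStepA, hc, if_pos]; exact ih V b
      · simp only [pvStepB, pvStepA, hc, if_neg, not_false_iff, List.nil_append]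
        rw [ih (PySem.Set.add V c) (b ++ [(c, d + 1)]), pvFoldA_acc cs (PySem.Set.add V c) [c]]
        simp

theorem pvLoopB_step_facts (adjacency : List (String × List String)) (node : String)
    (V : PySem.Set String) (d : Int) :
    ((PySem.Dict.mk adjacency).getD node []).foldl (pvStepB d) (V, ([] : List (String × Int))) = (V, []) ∨
      (pvUniv adjacency \
        ((((PySem.Dict.mk adjacency).getD node []).foldl (pvStepB d) (V, ([] : List (String × Int)))).1).toFinset).card <
        (pvUniv adjacency \ V.toFinset).card := by
  rw [pvFoldB_eq]
  rcases pvFoldA_growth ((PySem.Dict.mk adjacency).getD node []) (V, []) with heq | ⟨x, hx1, hx2, hx3⟩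
  · rw [heq]; exact Or.inl (by simp)
  · refine Or.inr ?_
    exact pvCard_lt adjacency (fun y hy => pvStepA_fst_mono _ (V, []) hy)
      (pvChild_mem_univ adjacency node x hx1) hx2 hx3

-- B's 'while i < len(queue)' loop: the unprocessed suffix of the queue is the argument
def pvLoopB (adjacency : List (String × List String)) (V : PySem.Set String)
    (queue : List (String × Int)) (maxDepth : Int) : Int :=
  match queue with
  | [] => maxDepth
  | (node, d) :: rest =>
      let st := ((PySem.Dict.mk adjacency).getD node []).foldl (pvStepB d) (V, [])
      pvLoopB adjacency st.1 (rest ++ st.2) (max maxDepth d)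
termination_by ((pvUniv adjacency \ V.toFinset).card, queue.length)
decreasing_by
  rcases pvLoopB_step_facts adjacency node V d with h | h
  · rw [h]
    simp only [List.append_nil]
    exact Prod.Lex.right _ (by simp)
  · exact Prod.Lex.left _ _ h

def bfs_depth_py_alt (adjacency : List (String × List String)) (root : String) : Int :=
  pvLoopB adjacency (PySem.Set.ofList [root]) [(root, 0)] 0

-- ===== PRECONDITION & SPEC =====
def Spec_bfs_depth_py (adjacency : List (String × List String)) (root : String) (out : Int) : Prop := out = bfs_depth_py_alt adjacency root
instance (adjacency : List (String × List String)) (root : String) (out : Int) : Decidable (Spec_bfs_depth_py adjacency root out) := by unfold Spec_bfs_depth_py; infer_instance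

-- ===== CLAIM (what is proved, stated in full; the proofs are below) =====
def Claim_equal_bfs_depth_py : Prop := ∀ (adjacency : List (String × List String)) (root : String), Dom_bfs_depth_py adjacency root → Spec_bfs_depth_py adjacency root (bfs_depth_py adjacency root)

-- ===== LEMMAS AND PROOFS =====

-- B's queue at a layer boundary holds layer f at distance d followed by a partial next
-- layer g at distance d+1; processing f performs exactly A's double loop on f.
theorem pvL1 (adjacency : List (String × List String)) (f : List String) :
    ∀ (V : PySem.Set String) (g : List String) (m d : Int),
    pvLoopB adjacency V (f.map (fun n => (n, d)) ++ g.map (fun n => (n, d + 1))) m =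
      pvLoopB adjacency (pvExpandA adjacency (V, g) f).1
        (((pvExpandA adjacency (V, g) f).2).map (fun n => (n, d + 1)))
        (if f = [] then m else max m d) := by
  induction f with
  | nil => intro V g m d; simp [pvExpandA]
  | cons n f ih =>
      intro V g m d
      rw [List.map_cons, List.cons_append, pvLoopB, pvFoldB_eq]
      simp only [List.nil_append, List.append_assoc, ← List.map_append]
      rw [ih _ _ (max m d) d]
      have hexp : pvExpandA adjacency (V, g) (n :: f) =
          pvExpandA adjacency
            ((((PySem.Dict.mk adjacency).getD n []).foldl pvStepA (V, [])).1,
             g ++ (((PySem.Dict.mk adjacency).getD n []).foldl pvStepA (V, [])).2) f := by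
        show pvExpandA adjacency (pvExpandNode adjacency (V, g) n) f = _
        rw [show pvExpandNode adjacency (V, g) n =
          ((((PySem.Dict.mk adjacency).getD n []).foldl pvStepA (V, [])).1,
           g ++ (((PySem.Dict.mk adjacency).getD n []).foldl pvStepA (V, [])).2) from pvFoldA_acc _ V g]
      rw [hexp]
      have hmx : (if f = [] then max m d else max (max m d) d) = (if n :: f = [] then m else max m d) := by
        rcases eq_or_ne f [] with hf | hf
        · simp [hf]
        · simp [hf]
      rw [hmx]

-- main simulation: from any state (visited V, frontier f at depth d, running max m ≤ d)
-- B's queue loop computes exactly A's layered loop.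
theorem pvL2 (adjacency : List (String × List String)) (n : Nat) :
    ∀ (f : List String) (V : PySem.Set String) (m d : Int),
    (pvUniv adjacency \ V.toFinset).card ≤ n → f ≠ [] → m ≤ d →
    pvLoopB adjacency V (f.map (fun x => (x, d))) m = pvLoopA adjacency V f d := by
  induction n with
  | zero =>
      intro f V m d hcard hf hm
      have h1 := pvL1 adjacency f V [] m d
      simp only [List.map_nil, List.append_nil, if_neg hf] at h1
      rw [h1, max_eq_right hm, pvLoopA]
      rw [dif_neg hf]
      by_cases h2 : (pvExpandA adjacency (V, []) f).2 = []
      · rw [dif_pos h2, h2]; simp [pvLoopB]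
      · exact absurd (Nat.lt_of_lt_of_le (pvLoopA_dec adjacency V f h2) hcard) (Nat.not_lt_zero _)
  | succ k ih =>
      intro f V m d hcard hf hm
      have h1 := pvL1 adjacency f V [] m d
      simp only [List.map_nil, List.append_nil, if_neg hf] at h1
      rw [h1, max_eq_right hm, pvLoopA]
      rw [dif_neg hf]
      by_cases h2 : (pvExpandA adjacency (V, []) f).2 = []
      · rw [dif_pos h2, h2]; simp [pvLoopB]
      · rw [dif_neg h2]
        exact ih (pvExpandA adjacency (V, []) f).2 (pvExpandA adjacency (V, []) f).1 d (d + 1)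
          (by have := pvLoopA_dec adjacency V f h2; omega) h2 (by omega)

-- ===== VERDICT (by name: the statement is the Claim_ definition above) =====
theorem bfs_depth_py_spec : Claim_equal_bfs_depth_py := by
  intro adjacency root _
  unfold Spec_bfs_depth_py bfs_depth_py bfs_depth_py_alt
  have h := pvL2 adjacency (pvUniv adjacency \ (PySem.Set.ofList [root]).toFinset).card
    [root] (PySem.Set.ofList [root]) 0 0 (le_refl _) (by simp) (le_refl _)
  simpa using h.symm
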